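-- pv_equiv track=rewrite | github.com/aidencullo/problems | problems/Amazon/problem2/solution.py | distinct_words
-- ===== SOURCE A (Python) =====
-- def distinct_words(password):
--     n = len(password)
--     passwords = set()
--     for i in range(n):
--         for j in range(i + 1, n + 1):
--             reversed_password = password[:i] + password[i:j][::-1] + password[j:]
--             if not reversed_password in passwords:
--                 passwords.add(reversed_password)
--     return len(passwords)
-- ===== SOURCE B (Python) =====
-- def distinct_words(password):
--     n = len(password)
--     if n == 0:
--         return 0
--     count = 1
--     for i in range(n):
--         for k in range(i + 1, n):
--             if password[i] != password[k]:
--                 count += 1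
--     return count
-- ===== Notes on version B (the rewrite author's own statement) =====
-- stated objective: faster
-- what changed: Instead of materialising every string obtained by reversing a substring and deduplicating them in a set, B counts the distinct results directly: they are the original string plus exactly one string per index pair i < k with password[i] != password[k] (every reversal interval trims to a unique such normal form).
import Mathlib
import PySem

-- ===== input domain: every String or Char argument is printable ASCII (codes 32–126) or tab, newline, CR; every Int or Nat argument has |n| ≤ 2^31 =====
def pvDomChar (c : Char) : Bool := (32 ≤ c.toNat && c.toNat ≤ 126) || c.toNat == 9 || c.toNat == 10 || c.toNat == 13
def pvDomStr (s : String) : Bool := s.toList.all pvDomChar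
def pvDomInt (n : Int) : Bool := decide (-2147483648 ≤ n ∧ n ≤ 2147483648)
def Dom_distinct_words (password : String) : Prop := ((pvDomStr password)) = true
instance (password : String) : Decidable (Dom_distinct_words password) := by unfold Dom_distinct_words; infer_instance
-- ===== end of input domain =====

-- B replaces A's O(n^3) "build every reversed variant and dedupe in a set" by an O(n^2)
-- character-pair count: the distinct results are the original string plus one string per
-- pair i < k with password[i] != password[k] (reversal intervals trim to a unique normal form).

-- ===== PORT A =====
def distinct_words (password : String) : Int :=
  let s := password.toList
  let n : Int := PySem.Chars.len s          -- n = len(password)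
  let passwords : PySem.Set (List Char) :=
    (PySem.List.pyRange 0 n).foldl (fun passwords i =>
      (PySem.List.pyRange (i + 1) (n + 1)).foldl (fun passwords j =>
        -- password[:i] + password[i:j][::-1] + password[j:]  ([::-1] is reverse: PySem.List.slice?_none_none_neg_one)
        let reversed_password :=
          PySem.List.slice s none (some i) ++ (PySem.List.slice s (some i) (some j)).reverse
            ++ PySem.List.slice s (some j) none
        if reversed_password ∈ passwords then passwords
        else PySem.Set.add passwords reversed_password)
        passwords)
      PySem.Set.empty
  PySem.Set.len passwords

-- ===== PORT B =====
def distinct_words_alt (password : String) : Int :=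
  let s := password.toList
  let n : Int := PySem.Chars.len s          -- n = len(password)
  if n = 0 then 0
  else
    (PySem.List.pyRange 0 n).foldl (fun count i =>
      (PySem.List.pyRange (i + 1) n).foldl (fun count k =>
        if PySem.List.pyGet? s i ≠ PySem.List.pyGet? s k then count + 1 else count)
        count)
      1

-- ===== PRECONDITION & SPEC =====
def Spec_distinct_words (password : String) (out : Int) : Prop := out = distinct_words_alt password
instance (password : String) (out : Int) : Decidable (Spec_distinct_words password out) := by unfold Spec_distinct_words; infer_instance

-- ===== CLAIM (what is proved, stated in full; the proofs are below) =====
def Claim_equal_distinct_words : Prop := ∀ (password : String), Dom_distinct_words password → Spec_distinct_words password (distinct_words password)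

-- ===== LEMMAS AND PROOFS =====

-- the result of reversing s[i:j], on the list side with Nat indices
def pvRevsub (s : List Char) (i j : Nat) : List Char :=
  s.take i ++ ((s.drop i).take (j - i)).reverse ++ s.drop j

-- the finite set of all values A ever inserts
def pvT (s : List Char) : Finset (List Char) :=
  ((Finset.range (s.length + 1) ×ˢ Finset.range (s.length + 1)).filter
    (fun p => p.1 < p.2)).image (fun p => pvRevsub s p.1 p.2)

-- the pairs i < k with s[i] ≠ s[k]; each contributes exactly one non-identity result
def pvD (s : List Char) : Finset (Nat × Nat) :=
  (Finset.range s.length ×ˢ Finset.range s.length).filter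
    (fun p => p.1 < p.2 ∧ s[p.1]? ≠ s[p.2]?)

lemma pvRevsub_get_lo (s : List Char) (i j p : Nat) (hp : p < i) (hi : i ≤ s.length) :
    (pvRevsub s i j)[p]? = s[p]? := by
  unfold pvRevsub
  rw [List.append_assoc, List.getElem?_append_left (by simp; omega), List.getElem?_take]
  simp [hp]

lemma pvRevsub_get_mid (s : List Char) (i j p : Nat) (hip : i ≤ p) (hpj : p < j)
    (hj : j ≤ s.length) : (pvRevsub s i j)[p]? = s[i + (j - 1 - p)]? := by
  unfold pvRevsub
  rw [List.append_assoc, List.getElem?_append_right (by simp; omega),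
    List.getElem?_append_left (by simp; omega),
    List.getElem?_reverse (by simp; omega), List.getElem?_take]
  rw [if_pos (by simp; omega), List.getElem?_drop]
  congr 1
  simp
  omega

lemma pvRevsub_get_hi (s : List Char) (i j p : Nat) (hjp : j ≤ p) (hij : i ≤ j)
    (hj : j ≤ s.length) : (pvRevsub s i j)[p]? = s[p]? := by
  unfold pvRevsub
  rw [List.append_assoc, List.getElem?_append_right (by simp; omega),
    List.getElem?_append_right (by simp; omega), List.getElem?_drop]
  congr 1
  simp
  omega

lemma pvRevsub_self (s : List Char) (i : Nat) : pvRevsub s i i = s := by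
  simp [pvRevsub]

lemma pvRevsub_succ (s : List Char) (i : Nat) : pvRevsub s i (i + 1) = s := by
  unfold pvRevsub
  have h1 : ((s.drop i).take (i + 1 - i)).reverse = (s.drop i).take 1 := by
    rcases hd : s.drop i with _ | ⟨a, t⟩ <;> simp
  have h2 : s.drop (i + 1) = (s.drop i).drop 1 := by
    rw [List.drop_drop]
  rw [h1, h2, List.append_assoc, List.take_append_drop, List.take_append_drop]

lemma pvRevsub_trim (s : List Char) (i j : Nat) (h : i + 2 ≤ j) (hj : j ≤ s.length)
    (hc : s[i]? = s[j - 1]?) : pvRevsub s i j = pvRevsub s (i + 1) (j - 1) := by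
  apply List.ext_getElem?
  intro p
  rcases Nat.lt_or_ge p i with hp | hp
  · rw [pvRevsub_get_lo s i j p hp (by omega), pvRevsub_get_lo s (i+1) (j-1) p (by omega) (by omega)]
  rcases Nat.eq_or_lt_of_le hp with hpe | hp2
  · rw [← hpe]
    rw [pvRevsub_get_mid s i j i le_rfl (by omega) hj,
      pvRevsub_get_lo s (i+1) (j-1) i (by omega) (by omega)]
    rw [show i + (j - 1 - i) = j - 1 by omega]
    exact hc.symm
  rcases Nat.lt_or_ge p (j-1) with hp3 | hp3
  · rw [pvRevsub_get_mid s i j p (by omega) (by omega) hj,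
      pvRevsub_get_mid s (i+1) (j-1) p (by omega) (by omega) (by omega)]
    congr 1
    omega
  rcases Nat.eq_or_lt_of_le hp3 with hpe | hp4
  · rw [← hpe]
    rw [pvRevsub_get_mid s i j (j-1) (by omega) (by omega) hj,
      pvRevsub_get_hi s (i+1) (j-1) (j-1) le_rfl (by omega) (by omega)]
    rw [show i + (j - 1 - (j - 1)) = i by omega]
    exact hc
  · rw [pvRevsub_get_hi s i j p (by omega) (by omega) hj,
      pvRevsub_get_hi s (i+1) (j-1) p (by omega) (by omega) (by omega)]

lemma mem_pvT (s : List Char) (y : List Char) :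
    y ∈ pvT s ↔ ∃ i j : Nat, i < j ∧ j ≤ s.length ∧ y = pvRevsub s i j := by
  constructor
  · intro hy
    simp only [pvT, Finset.mem_image, Finset.mem_filter, Finset.mem_product,
      Finset.mem_range] at hy
    obtain ⟨⟨i, j⟩, ⟨⟨_, hj⟩, hlt⟩, rfl⟩ := hy
    exact ⟨i, j, hlt, by omega, rfl⟩
  · rintro ⟨i, j, hlt, hj, rfl⟩
    simp only [pvT, Finset.mem_image, Finset.mem_filter, Finset.mem_product,
      Finset.mem_range]
    exact ⟨(i, j), ⟨⟨by omega, by omega⟩, hlt⟩, rfl⟩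

lemma mem_pvD (s : List Char) (i k : Nat) :
    (i, k) ∈ pvD s ↔ i < k ∧ k < s.length ∧ s[i]? ≠ s[k]? := by
  simp only [pvD, Finset.mem_filter, Finset.mem_product, Finset.mem_range]
  constructor
  · rintro ⟨⟨_, hk⟩, hik, hne⟩; exact ⟨hik, hk, hne⟩
  · rintro ⟨hik, hk, hne⟩; exact ⟨⟨by omega, hk⟩, hik, hne⟩

lemma pvInj_fst (s : List Char) (i k i' k' : Nat)
    (h : (i, k) ∈ pvD s) (h' : (i', k') ∈ pvD s)
    (heq : pvRevsub s i (k + 1) = pvRevsub s i' (k' + 1)) (hlt : i < i') : False := by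
  obtain ⟨hik, hk, hne⟩ := (mem_pvD s i k).mp h
  obtain ⟨hik', hk', hne'⟩ := (mem_pvD s i' k').mp h'
  apply hne
  have h1 := pvRevsub_get_mid s i (k+1) i le_rfl (by omega) (by omega)
  rw [show i + (k + 1 - 1 - i) = k by omega] at h1
  have h2 := pvRevsub_get_lo s i' (k'+1) i hlt (by omega)
  rw [← heq] at h2
  rw [h1] at h2
  exact h2.symm

lemma pvInj_snd (s : List Char) (i k k' : Nat)
    (h : (i, k) ∈ pvD s) (h' : (i, k') ∈ pvD s)
    (heq : pvRevsub s i (k + 1) = pvRevsub s i (k' + 1)) (hlt : k < k') : False := by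
  obtain ⟨hik, hk, hne⟩ := (mem_pvD s i k).mp h
  obtain ⟨hik', hk', hne'⟩ := (mem_pvD s i k').mp h'
  apply hne'
  have h1 := pvRevsub_get_mid s i (k'+1) k' (by omega) (by omega) (by omega)
  rw [show i + (k' + 1 - 1 - k') = i by omega] at h1
  have h2 := pvRevsub_get_hi s i (k+1) k' (by omega) (by omega) (by omega)
  rw [heq] at h2
  rw [h1] at h2
  exact h2

lemma pvT_subset (s : List Char) : ∀ m i j, j - i ≤ m → i < j → j ≤ s.length →
    pvRevsub s i j ∈ insert s ((pvD s).image (fun p => pvRevsub s p.1 (p.2 + 1))) := by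
  intro m
  induction m with
  | zero => intro i j hm hij _; omega
  | succ m ih =>
    intro i j hm hij hj
    by_cases h1 : j = i + 1
    · subst h1; rw [pvRevsub_succ]; exact Finset.mem_insert_self _ _
    by_cases hc : s[i]? = s[j - 1]?
    · by_cases h2 : j = i + 2
      · subst h2
        rw [pvRevsub_trim s i (i+2) (by omega) hj hc]
        rw [show i + 2 - 1 = i + 1 by omega, pvRevsub_self]
        exact Finset.mem_insert_self _ _
      · rw [pvRevsub_trim s i j (by omega) hj hc]
        exact ih (i+1) (j-1) (by omega) (by omega) (by omega)
    · apply Finset.mem_insert_of_mem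
      apply Finset.mem_image.mpr
      refine ⟨(i, j - 1), (mem_pvD s i (j-1)).mpr ⟨by omega, by omega, ?_⟩, ?_⟩
      · exact hc
      · simp only
        rw [show j - 1 + 1 = j by omega]

lemma pvT_eq (s : List Char) (hn : 1 ≤ s.length) :
    pvT s = insert s ((pvD s).image (fun p => pvRevsub s p.1 (p.2 + 1))) := by
  apply Finset.Subset.antisymm
  · intro y hy
    obtain ⟨i, j, hij, hj, rfl⟩ := (mem_pvT s y).mp hy
    exact pvT_subset s (j - i) i j le_rfl hij hj
  · intro y hy
    rcases Finset.mem_insert.mp hy with heq | hy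
    · subst heq
      exact (mem_pvT y y).mpr ⟨0, 1, Nat.zero_lt_one, hn, (pvRevsub_succ y 0).symm⟩
    · obtain ⟨⟨i, k⟩, hmem, rfl⟩ := Finset.mem_image.mp hy
      obtain ⟨hik, hk, _⟩ := (mem_pvD s i k).mp hmem
      exact (mem_pvT s _).mpr ⟨i, k + 1, by omega, by omega, rfl⟩

lemma pvS_notMem (s : List Char) :
    s ∉ (pvD s).image (fun p => pvRevsub s p.1 (p.2 + 1)) := by
  intro hy
  obtain ⟨⟨i, k⟩, hmem, heq⟩ := Finset.mem_image.mp hy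
  obtain ⟨hik, hk, hne⟩ := (mem_pvD s i k).mp hmem
  apply hne
  have := pvRevsub_get_mid s i (k+1) i le_rfl (by omega) (by omega)
  rw [heq] at this
  rw [show i + (k + 1 - 1 - i) = k by omega] at this
  exact this

lemma pvInjOn (s : List Char) :
    Set.InjOn (fun p : Nat × Nat => pvRevsub s p.1 (p.2 + 1)) ↑(pvD s) := by
  rintro ⟨i, k⟩ hp ⟨i', k'⟩ hq heq
  simp only [Finset.mem_coe] at hp hq
  simp only at heq
  have hfst : i = i' := by
    rcases Nat.lt_trichotomy i i' with h | h | h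
    · exact absurd (pvInj_fst s i k i' k' hp hq heq h) (by simp)
    · exact h
    · exact absurd (pvInj_fst s i' k' i k hq hp heq.symm h) (by simp)
  subst hfst
  have hsnd : k = k' := by
    rcases Nat.lt_trichotomy k k' with h | h | h
    · exact absurd (pvInj_snd s i k k' hp hq heq h) (by simp)
    · exact h
    · exact absurd (pvInj_snd s i k' k hq hp heq.symm h) (by simp)
  rw [hsnd]

lemma pvT_card (s : List Char) (hn : 1 ≤ s.length) :
    (pvT s).card = 1 + (pvD s).card := by
  rw [pvT_eq s hn, Finset.card_insert_of_notMem (pvS_notMem s),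
    Finset.card_image_of_injOn (pvInjOn s)]
  omega

lemma pvT_card_nil (s : List Char) (hn : s.length = 0) : (pvT s).card = 0 := by
  rw [Finset.card_eq_zero]
  ext y
  simp only [mem_pvT, Finset.notMem_empty, iff_false]
  rintro ⟨i, j, hij, hj, _⟩
  omega

-- the double fold of Set.update is one update by the flattened value list
lemma pv_foldl_update {β : Type} (L : List β) (g : β → List (List Char))
    (s0 : PySem.Set (List Char)) :
    L.foldl (fun ps i => PySem.Set.update ps (g i)) s0 = PySem.Set.update s0 (L.flatMap g) := by
  induction L generalizing s0 with
  | nil => simp [PySem.Set.update_nil]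
  | cons a t ih =>
    simp only [List.foldl_cons, List.flatMap_cons]
    rw [ih, PySem.Set.update_append]

-- A returns the cardinality of pvT
lemma pv_r_eq (s : List Char) (i j : Int) (hi : 0 ≤ i) (hj : 0 ≤ j) :
    PySem.List.slice s none (some i) ++ (PySem.List.slice s (some i) (some j)).reverse
      ++ PySem.List.slice s (some j) none = pvRevsub s i.toNat j.toNat := by
  rw [PySem.List.slice_to s hi, PySem.List.slice_toNat s hi hj, PySem.List.slice_from s hj]
  rfl

lemma pvA_eq (password : String) :
    distinct_words password = ((pvT password.toList).card : Int) := by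
  unfold distinct_words
  simp only [PySem.Chars.len_eq]
  set s := password.toList with hs
  have houter : ∀ (ps : PySem.Set (List Char)), ∀ i ∈ PySem.List.pyRange 0 (s.length : Int),
      (PySem.List.pyRange (i + 1) ((s.length : Int) + 1)).foldl (fun ps j =>
        let reversed_password :=
          PySem.List.slice s none (some i) ++ (PySem.List.slice s (some i) (some j)).reverse
            ++ PySem.List.slice s (some j) none
        if reversed_password ∈ ps then ps
        else PySem.Set.add ps reversed_password) ps
      = PySem.Set.update ps ((PySem.List.pyRange (i + 1) ((s.length : Int) + 1)).map (fun j =>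
          PySem.List.slice s none (some i) ++ (PySem.List.slice s (some i) (some j)).reverse
            ++ PySem.List.slice s (some j) none)) := by
    intro ps i _
    rw [PySem.Set.update_map_eq_foldl_add]
    apply PySem.List.foldl_congr_mem
    intro acc x _
    show (if _ ∈ acc then acc else PySem.Set.add acc _) = _
    by_cases hx : PySem.List.slice s none (some i) ++ (PySem.List.slice s (some i) (some x)).reverse
        ++ PySem.List.slice s (some x) none ∈ acc
    · rw [if_pos hx, PySem.Set.add_of_mem hx]
    · rw [if_neg hx]
  rw [PySem.List.foldl_congr_mem _ _ _ _ (fun acc x hx => houter acc x hx)]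
  rw [pv_foldl_update, PySem.Set.update_empty]
  have hfin : (PySem.Set.ofList ((PySem.List.pyRange 0 (s.length : Int)).flatMap (fun i =>
      (PySem.List.pyRange (i + 1) ((s.length : Int) + 1)).map (fun j =>
        PySem.List.slice s none (some i) ++ (PySem.List.slice s (some i) (some j)).reverse
          ++ PySem.List.slice s (some j) none)))).toFinset = pvT s := by
    ext y
    rw [List.mem_toFinset, PySem.Set.mem_ofList, mem_pvT]
    simp only [List.mem_flatMap, List.mem_map, PySem.List.mem_pyRange_one]
    constructor
    · rintro ⟨i, ⟨hi0, hin⟩, j, ⟨hj1, hjn⟩, rfl⟩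
      refine ⟨i.toNat, j.toNat, by omega, by omega, pv_r_eq s i j hi0 (by omega)⟩
    · rintro ⟨i, j, hij, hj, rfl⟩
      refine ⟨(i : Int), ⟨by omega, by omega⟩, (j : Int), ⟨by omega, by omega⟩, ?_⟩
      rw [pv_r_eq s (i : Int) (j : Int) (by omega) (by omega)]
      simp
  have hnodup := PySem.Set.nodup_ofList ((PySem.List.pyRange 0 (s.length : Int)).flatMap (fun i =>
      (PySem.List.pyRange (i + 1) ((s.length : Int) + 1)).map (fun j =>
        PySem.List.slice s none (some i) ++ (PySem.List.slice s (some i) (some j)).reverse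
          ++ PySem.List.slice s (some j) none)))
  have hlen := List.toFinset_card_of_nodup hnodup
  rw [hfin] at hlen
  show ((PySem.Set.ofList _).length : Int) = _
  rw [← hlen]

-- countP over a Python range is a filtered-card over Finset.range
lemma pv_pyRange_nil (a b : Int) (h : b ≤ a) : PySem.List.pyRange a b = [] := by
  apply List.eq_nil_iff_forall_not_mem.mpr
  intro x hx
  have := PySem.List.mem_pyRange_one.mp hx
  omega

lemma pv_countP_pyRange (p : Int → Bool) (a b : Nat) :
    List.countP p (PySem.List.pyRange (a : Int) (b : Int)) =
      ((Finset.range b).filter (fun k => a ≤ k ∧ p (k : Int) = true)).card := by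
  induction b with
  | zero =>
    rw [pv_pyRange_nil _ _ (by exact_mod_cast Nat.zero_le a)]
    simp
  | succ b ih =>
    by_cases hab : a ≤ b
    · rw [show ((b + 1 : Nat) : Int) = (b : Int) + 1 by push_cast; ring,
        PySem.List.pyRange_one_succ_right (by exact_mod_cast hab), List.countP_append, ih,
        Finset.range_add_one, Finset.filter_insert]
      by_cases hp : p (b : Int) = true
      · rw [if_pos ⟨hab, hp⟩, Finset.card_insert_of_notMem (by simp)]
        simp [hp]
      · rw [if_neg (by tauto)]
        simp [hp]
    · rw [pv_pyRange_nil _ _ (by exact_mod_cast Nat.le_of_lt_succ (by omega))]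
      have : ((Finset.range (b+1)).filter (fun k => a ≤ k ∧ p (k : Int) = true)) = ∅ := by
        apply Finset.filter_eq_empty_iff.mpr
        intro k hk
        simp only [Finset.mem_range] at hk
        intro hc
        omega
      simp [this]

lemma pvD_card (s : List Char) :
    (pvD s).card = ∑ i ∈ Finset.range s.length,
      ((Finset.range s.length).filter (fun k => i < k ∧ s[i]? ≠ s[k]?)).card := by
  rw [pvD, Finset.card_filter, Finset.sum_product]
  apply Finset.sum_congr rfl
  intro i _
  rw [Finset.card_filter]

-- B returns 1 + |pvD| (and 0 on the empty string)
lemma pvB_eq (password : String) :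
    distinct_words_alt password =
      if password.toList.length = 0 then 0 else 1 + ((pvD password.toList).card : Int) := by
  unfold distinct_words_alt
  simp only [PySem.Chars.len_eq]
  set s := password.toList with hs
  by_cases h : s.length = 0
  · simp [h]
  · rw [if_neg (by exact_mod_cast h), if_neg h]
    have hinner : ∀ (c : Int) (i : Int),
        (PySem.List.pyRange (i + 1) (s.length : Int)).foldl (fun count k =>
          if PySem.List.pyGet? s i ≠ PySem.List.pyGet? s k then count + 1 else count) c
        = c + ((PySem.List.pyRange (i + 1) (s.length : Int)).countP
            (fun k => decide (PySem.List.pyGet? s i ≠ PySem.List.pyGet? s k)) : Int) := by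
      intro c i
      exact PySem.List.foldl_ite_add_one _ _ c
    rw [PySem.List.foldl_congr_mem _ _
      (fun c i => c + ((PySem.List.pyRange (i + 1) (s.length : Int)).countP
            (fun k => decide (PySem.List.pyGet? s i ≠ PySem.List.pyGet? s k)) : Int)) 1
      (fun acc x _ => hinner acc x)]
    rw [PySem.List.foldl_add]
    rw [PySem.List.pyRange_zero_natCast, List.map_map]
    congr 1
    have hmap : ∀ i ∈ List.range s.length,
        ((fun i => ((PySem.List.pyRange (i + 1) (s.length : Int)).countP
            (fun k => decide (PySem.List.pyGet? s i ≠ PySem.List.pyGet? s k)) : Int)) ∘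
          (fun k : Nat => (k : Int))) i
        = (((Finset.range s.length).filter (fun k => i < k ∧ s[i]? ≠ s[k]?)).card : Int) := by
      intro i _
      simp only [Function.comp]
      rw [show ((i : Int) + 1) = ((i + 1 : Nat) : Int) by push_cast; ring]
      rw [pv_countP_pyRange]
      have hf : (Finset.range s.length).filter
            (fun k => i + 1 ≤ k ∧ decide (PySem.List.pyGet? s (i:Int) ≠ PySem.List.pyGet? s (k:Int)) = true)
          = (Finset.range s.length).filter (fun k => i < k ∧ s[i]? ≠ s[k]?) := by
        apply Finset.filter_congr
        intro k _
        simp only [PySem.List.pyGet?_natCast, decide_eq_true_eq]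
        constructor
        · rintro ⟨h1, h2⟩; exact ⟨by omega, h2⟩
        · rintro ⟨h1, h2⟩; exact ⟨by omega, h2⟩
      rw [hf]
    rw [List.map_congr_left hmap, pvD_card]
    rw [show ∀ (f : Nat → Int) n, (List.map f (List.range n)).sum = ∑ i ∈ Finset.range n, f i
      from fun f n => rfl]
    rw [Nat.cast_sum]

-- ===== VERDICT (by name: the statement is the Claim_ definition above) =====
theorem distinct_words_spec : Claim_equal_distinct_words := by
  intro password _
  unfold Spec_distinct_words
  rw [pvA_eq, pvB_eq]
  by_cases h : password.toList.length = 0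
  · simp [h, pvT_card_nil _ h]
  · rw [if_neg h, pvT_card _ (by omega)]
    push_cast
    ring
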